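-- pv_equiv track=rewrite | github.com/toldandretold/hyperlit | app/Python/cyber-Marx/combine_and_process.py | process_main_body
-- ===== SOURCE A (Python) =====
-- def process_main_body(text):
--     """
--     METHODOLOGY A: Processes the main prose of the chapter.
--     Uses a line-by-line buffer to correctly identify paragraphs separated
--     by blank lines.
--     """
--     def process_block(buffer):
--         # Helper to format a collected block of lines
--         if not buffer:
--             return None
--
--         full_block = " ".join(buffer)
--
--         # Is it a page number?
--         if len(buffer) == 1 and buffer[0].isdigit():
--             return f'<a id="pp{buffer[0]}"></a>'
--
--         # Is it an indented blockquote?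
--         if buffer[0].startswith("     "):
--             # Re-join with newlines and format as a quote
--             quote_lines = " ".join(buffer).split("  ") # Split by multiple spaces
--             return "\n".join([f"> {line.strip()}" for line in quote_lines if line.strip()])
--
--         # Is it a subtitle?
--         if len(buffer) == 1 and buffer[0].istitle() and len(buffer[0]) < 100:
--             return f"## {buffer[0]}"
--
--         return full_block
--
--     # --- Line-by-line processing logic ---
--     output_blocks = []
--     paragraph_buffer = []
--     for line in text.splitlines():
--         stripped_line = line.strip()
--         if stripped_line:
--             paragraph_buffer.append(stripped_line)
--         else:
--             formatted = process_block(paragraph_buffer)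
--             if formatted:
--                 output_blocks.append(formatted)
--             paragraph_buffer = []
--
--     # Process the last paragraph in the buffer
--     formatted = process_block(paragraph_buffer)
--     if formatted:
--         output_blocks.append(formatted)
--
--     return "\n\n".join(output_blocks)
-- ===== SOURCE B (Python) =====
-- def process_main_body(text):
--     """
--     METHODOLOGY B: partition the stripped lines into paragraph blocks first,
--     then format each block in a second pass (instead of A's incremental
--     buffer-and-flush inside one loop).  The indented-blockquote branch of A
--     is dead code (buffered lines are stripped, so they never start with
--     spaces) and is therefore omitted.
--     """
--     def fmt(block):
--         if len(block) == 1: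
--             only = block[0]
--             if only.isdigit():
--                 return f'<a id="pp{only}"></a>'
--             if only.istitle() and len(only) < 100:
--                 return f"## {only}"
--         return " ".join(block)
--
--     lines = [ln.strip() for ln in text.splitlines()]
--     blocks = []
--     i, n = 0, len(lines)
--     while i < n:
--         if lines[i]:
--             j = i
--             while j < n and lines[j]:
--                 j += 1
--             blocks.append(lines[i:j])
--             i = j
--         else:
--             i += 1
--     return "\n\n".join(fmt(b) for b in blocks)
-- ===== Notes on version B (the rewrite author's own statement) =====
-- stated objective: simpler
-- what changed: B first partitions the stripped lines into paragraph blocks (a scan that groups maximal runs of non-blank lines) and then formats each block with a total, None-free formatter in a separate pass, dropping A's incremental buffer-and-flush control flow and A's unreachable indented-blockquote branch (buffered lines are stripped, so they never start with spaces).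
import Mathlib
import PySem

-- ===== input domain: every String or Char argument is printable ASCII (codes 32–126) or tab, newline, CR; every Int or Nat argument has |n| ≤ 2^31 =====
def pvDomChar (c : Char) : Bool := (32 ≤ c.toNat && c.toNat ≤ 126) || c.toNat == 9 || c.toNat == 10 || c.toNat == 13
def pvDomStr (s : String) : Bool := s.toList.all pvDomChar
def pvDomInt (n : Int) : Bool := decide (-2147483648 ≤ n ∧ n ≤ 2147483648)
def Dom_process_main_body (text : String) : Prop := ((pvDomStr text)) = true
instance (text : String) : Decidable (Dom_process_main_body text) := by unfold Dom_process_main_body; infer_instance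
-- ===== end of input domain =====

-- B partitions the stripped lines into paragraph blocks first and then formats each block in
-- a second pass, replacing A's incremental buffer-and-flush control flow (objective: simpler).

-- str.istitle() (Python built-in used by both versions, hand-ported; exact on the
-- printable-ASCII domain): state = none (failed) or some (cased so far, previous char cased)
def pvIstitle (cs : List Char) : Bool :=
  (cs.foldl (fun st c =>
      match st with
      | none => none
      | some (cased, prev) =>
        if PySem.Chars.isupper c then (if prev then none else some (true, true))
        else if PySem.Chars.islower c then (if prev then some (true, true) else none)
        else some (cased, false))
    (some (false, false))).elim false Prod.fst

-- ===== PORT A =====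
-- A's inner helper process_block, step for step (including the indented-blockquote branch)
def pvProcessBlock (buffer : List (List Char)) : Option (List Char) :=
  match buffer with
  | [] => none
  | b0 :: _ =>
    let fullBlock := PySem.Chars.join [' '] buffer
    if buffer.length = 1 && PySem.Chars.strIsdigit b0 then
      some (("<a id=\"pp".toList) ++ b0 ++ ("\"></a>".toList))
    else if PySem.Chars.startswith b0 ("     ".toList) then
      let quoteLines := PySem.Chars.splitOn (PySem.Chars.join [' '] buffer) ("  ".toList)
      some (PySem.Chars.join ['\n']
        ((quoteLines.filter (fun l => !(PySem.Chars.strip l).isEmpty)).map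
          (fun l => ("> ".toList) ++ PySem.Chars.strip l)))
    else if buffer.length = 1 && pvIstitle b0 && b0.length < 100 then
      some (("## ".toList) ++ b0)
    else some fullBlock

-- 'formatted = process_block(buf); if formatted: out.append(formatted)'
-- (Python truthiness: None and "" are both skipped)
def pvFlush (out : List (List Char)) (buf : List (List Char)) : List (List Char) :=
  match pvProcessBlock buf with
  | none => out
  | some f => if f.isEmpty then out else out ++ [f]

-- the body of A's for-loop over text.splitlines()
def pvStepA (st : List (List Char) × List (List Char)) (line : List Char) :
    List (List Char) × List (List Char) :=
  let stripped := PySem.Chars.strip line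
  if !stripped.isEmpty then (st.1, st.2 ++ [stripped]) else (pvFlush st.1 st.2, [])

def process_main_body (text : String) : String :=
  let p := (PySem.Chars.splitlines text.toList).foldl pvStepA ([], [])
  String.ofList (PySem.Chars.join ("\n\n".toList) (pvFlush p.1 p.2))

-- ===== PORT B =====
-- B's total formatter fmt
def pvFmt (block : List (List Char)) : List Char :=
  match block with
  | [only] =>
    if PySem.Chars.strIsdigit only then ("<a id=\"pp".toList) ++ only ++ ("\"></a>".toList)
    else if pvIstitle only && only.length < 100 then ("## ".toList) ++ only
    else PySem.Chars.join [' '] block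
  | _ => PySem.Chars.join [' '] block

-- B's scan collecting the maximal runs of non-blank lines (lines[i:j] = head :: takeWhile run)
def pvBlocksOf : List (List Char) → List (List (List Char))
  | [] => []
  | l :: rest =>
    if l.isEmpty then pvBlocksOf rest
    else (l :: rest.takeWhile (fun x => !x.isEmpty)) ::
         pvBlocksOf (rest.dropWhile (fun x => !x.isEmpty))
termination_by ls => ls.length
decreasing_by
  · simp
  · have h := List.length_dropWhile_le (fun x : List Char => !x.isEmpty) rest
    simp only [List.length_cons]; omega

def process_main_body_alt (text : String) : String :=
  let lines := (PySem.Chars.splitlines text.toList).map PySem.Chars.strip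
  String.ofList (PySem.Chars.join ("\n\n".toList) ((pvBlocksOf lines).map pvFmt))

-- ===== PRECONDITION & SPEC =====
def Spec_process_main_body (text : String) (out : String) : Prop := out = process_main_body_alt text
instance (text : String) (out : String) : Decidable (Spec_process_main_body text out) := by unfold Spec_process_main_body; infer_instance

-- ===== CLAIM (what is proved, stated in full; the proofs are below) =====
def Claim_equal_process_main_body : Prop := ∀ (text : String), Dom_process_main_body text → Spec_process_main_body text (process_main_body text)

-- ===== LEMMAS AND PROOFS =====

-- invariant on A's buffer: every buffered line is nonempty and starts with a non-space char
def pvInv (buf : List (List Char)) : Prop :=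
  ∀ b ∈ buf, ∃ c cs, b = c :: cs ∧ PySem.Chars.isspace c = false

-- proof-side block builder that follows A's incremental flushes
def pvBF (buf : List (List Char)) : List (List Char) → List (List (List Char))
  | [] => if buf.isEmpty then [] else [buf]
  | s :: rest =>
    if s.isEmpty then (if buf.isEmpty then [] else [buf]) ++ pvBF [] rest
    else pvBF (buf ++ [s]) rest

lemma pv_join_cons_isEmpty (c : Char) (cs : List Char) (rest : List (List Char)) :
    (PySem.Chars.join [' '] ((c :: cs) :: rest)).isEmpty = false := by
  cases rest <;> simp [PySem.Chars.join, List.intercalate, List.intersperse]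

lemma pv_head_dropWhile (p : Char → Bool) (l : List Char) (c : Char) (cs : List Char)
    (h : l.dropWhile p = c :: cs) : p c = false := by
  induction l with
  | nil => simp at h
  | cons a t ih =>
    rw [List.dropWhile_cons] at h
    split at h
    · exact ih h
    · rename_i hp; cases h; simpa using hp

lemma pv_rstrip_prefix (xs : List Char) : PySem.Chars.rstrip xs <+: xs := by
  unfold PySem.Chars.rstrip
  have h := List.dropWhile_suffix (l := xs.reverse) PySem.Chars.isspace
  have h2 := List.reverse_prefix.mpr h
  simpa using h2

lemma pv_strip_cons_not_space {l : List Char} {c : Char} {cs : List Char}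
    (h : PySem.Chars.strip l = c :: cs) : PySem.Chars.isspace c = false := by
  obtain ⟨t, ht⟩ := pv_rstrip_prefix (PySem.Chars.lstrip l)
  rw [show PySem.Chars.rstrip (PySem.Chars.lstrip l) = PySem.Chars.strip l from rfl, h] at ht
  have h3 : List.dropWhile PySem.Chars.isspace l = c :: (cs ++ t) := by
    simpa [PySem.Chars.lstrip] using ht.symm
  exact pv_head_dropWhile _ _ _ _ h3

-- on an invariant-respecting nonempty buffer, A's process_block is exactly B's fmt,
-- it never produces "" (so A's truthiness test is just 'nonempty buffer'),
-- and the blockquote branch never fires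
lemma pv_processBlock_eq (buf : List (List Char)) (hne : buf ≠ []) (hinv : pvInv buf) :
    pvProcessBlock buf = some (pvFmt buf) ∧ (pvFmt buf).isEmpty = false := by
  match buf with
  | [] => exact absurd rfl hne
  | b0 :: rest =>
    obtain ⟨c, cs, rfl, hc⟩ := hinv b0 (List.mem_cons_self)
    have hcsp : (' ' == c) = false := by
      by_contra hh
      simp only [Bool.not_eq_false, beq_iff_eq] at hh
      rw [← hh] at hc
      exact absurd hc (by decide)
    have hsp : PySem.Chars.startswith (c :: cs) [' ', ' ', ' ', ' ', ' '] = false := by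
      simp [PySem.Chars.startswith, List.isPrefixOf, hcsp]
    cases rest with
    | nil =>
      refine ⟨?_, ?_⟩ <;>
        simp only [pvProcessBlock, pvFmt, List.length_cons, List.length_nil] <;>
        split_ifs <;>
        simp_all
    | cons r rr =>
      refine ⟨?_, ?_⟩ <;>
        simp [pvProcessBlock, pvFmt, hsp, pv_join_cons_isEmpty]

lemma pv_flush_eq (out buf : List (List Char)) (hinv : pvInv buf) :
    pvFlush out buf = out ++ (pvBF buf []).map pvFmt := by
  cases buf with
  | nil => simp [pvFlush, pvProcessBlock, pvBF]
  | cons b0 rest =>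
    obtain ⟨h1, h2⟩ := pv_processBlock_eq (b0 :: rest) (by simp) hinv
    simp [pvFlush, h1, h2, pvBF]

lemma pv_loopA (L : List (List Char)) : ∀ (out buf : List (List Char)), pvInv buf →
    (let p := L.foldl pvStepA (out, buf); pvFlush p.1 p.2)
      = out ++ (pvBF buf (L.map PySem.Chars.strip)).map pvFmt := by
  induction L with
  | nil => intro out buf hinv; simpa [pvBF] using pv_flush_eq out buf hinv
  | cons l L ih =>
    intro out buf hinv
    simp only [List.foldl_cons, List.map_cons]
    by_cases hs : (PySem.Chars.strip l).isEmpty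
    · have hstep : pvStepA (out, buf) l = (pvFlush out buf, []) := by
        simp [pvStepA, hs]
      have h0 := ih (pvFlush out buf) [] (by intro b hb; cases hb)
      simp only at h0 ⊢
      rw [hstep, h0, pv_flush_eq out buf hinv]
      simp [pvBF, hs, List.append_assoc]
    · have hstep : pvStepA (out, buf) l = (out, buf ++ [PySem.Chars.strip l]) := by
        simp [pvStepA, hs]
      have hinv' : pvInv (buf ++ [PySem.Chars.strip l]) := by
        intro b hb
        rcases List.mem_append.mp hb with h | h
        · exact hinv b h
        · rcases List.mem_singleton.mp h with rfl
          cases hsl : PySem.Chars.strip l with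
          | nil => rw [hsl] at hs; simp at hs
          | cons c cs => exact ⟨c, cs, rfl, pv_strip_cons_not_space hsl⟩
      have h0 := ih out (buf ++ [PySem.Chars.strip l]) hinv'
      simp only at h0 ⊢
      rw [hstep, h0]
      simp [pvBF, hs]

-- A's flush-built block list is exactly B's run-grouping of the stripped lines
lemma pv_bf_blocks (L : List (List Char)) :
    pvBF [] L = pvBlocksOf L ∧
    ∀ buf, buf ≠ [] → pvBF buf L =
      (buf ++ L.takeWhile (fun x => !x.isEmpty)) ::
        pvBlocksOf (L.dropWhile (fun x => !x.isEmpty)) := by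
  induction L with
  | nil =>
    refine ⟨by simp [pvBF, pvBlocksOf], fun buf hb => ?_⟩
    simp [pvBF, pvBlocksOf, hb]
  | cons s rest ih =>
    refine ⟨?_, fun buf hb => ?_⟩
    · by_cases hs : s.isEmpty
      · simp [pvBF, pvBlocksOf, hs, ih.1]
      · rw [show pvBF [] (s :: rest) = pvBF [s] rest by simp [pvBF, hs],
           ih.2 [s] (by simp)]
        simp [pvBlocksOf, hs]
    · by_cases hs : s.isEmpty
      · rw [show pvBF buf (s :: rest) = [buf] ++ pvBF [] rest by simp [pvBF, hs, hb]]
        simp [pvBlocksOf, hs, ih.1]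
      · rw [show pvBF buf (s :: rest) = pvBF (buf ++ [s]) rest by simp [pvBF, hs],
           ih.2 (buf ++ [s]) (by simp)]
        simp [hs]

-- ===== VERDICT (by name: the statement is the Claim_ definition above) =====
theorem process_main_body_spec : Claim_equal_process_main_body := by
  intro text _
  unfold Spec_process_main_body process_main_body process_main_body_alt
  show String.ofList (PySem.Chars.join ("\n\n".toList)
      (pvFlush ((PySem.Chars.splitlines text.toList).foldl pvStepA ([], [])).1
               ((PySem.Chars.splitlines text.toList).foldl pvStepA ([], [])).2))
    = String.ofList (PySem.Chars.join ("\n\n".toList)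
      ((pvBlocksOf ((PySem.Chars.splitlines text.toList).map PySem.Chars.strip)).map pvFmt))
  have h := pv_loopA (PySem.Chars.splitlines text.toList) [] [] (by intro b hb; cases hb)
  simp only at h
  rw [h, (pv_bf_blocks _).1]
  simp
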